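-- pv_equiv track=rewrite | github.com/nguyenluunhatminh02/LEARNING | python/python_exercises_29_advanced.py | directed_graph_path
-- ===== SOURCE A (Python) =====
-- def directed_graph_path(graph, start, end):
--     visited = set()
--     path = []
--
--     def dfs(node):
--         if node == end:
--             path.append(node)
--             return True
--
--         if node in visited:
--             return False
--
--         visited.add(node)
--         path.append(node)
--
--         for neighbor in graph.get(node, []):
--             if dfs(neighbor):
--                 return True
--
--         path.pop()
--         return False
--
--     if dfs(start):
--         return path
--     return None
-- ===== SOURCE B (Python) =====
-- def directed_graph_path(graph, start, end):
--     if start == end: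
--         return [start]
--     visited = {start}
--     path = [start]
--     stack = [(start, iter(graph.get(start, [])))]
--     while stack:
--         node, it = stack[-1]
--         pushed = False
--         for n in it:
--             if n == end:
--                 path.append(n)
--                 return path
--             if n not in visited:
--                 visited.add(n)
--                 path.append(n)
--                 stack.append((n, iter(graph.get(n, []))))
--                 pushed = True
--                 break
--         if not pushed:
--             stack.pop()
--             path.pop()
--     return None
-- ===== Notes on version B (the rewrite author's own statement) =====
-- stated objective: alternative
-- what changed: A's recursive DFS with shared mutable visited/path is replaced by an iterative DFS driven by an explicit stack of (node, remaining-neighbours iterator) frames, pushing on first unvisited neighbour and popping the path on iterator exhaustion.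
import Mathlib
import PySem

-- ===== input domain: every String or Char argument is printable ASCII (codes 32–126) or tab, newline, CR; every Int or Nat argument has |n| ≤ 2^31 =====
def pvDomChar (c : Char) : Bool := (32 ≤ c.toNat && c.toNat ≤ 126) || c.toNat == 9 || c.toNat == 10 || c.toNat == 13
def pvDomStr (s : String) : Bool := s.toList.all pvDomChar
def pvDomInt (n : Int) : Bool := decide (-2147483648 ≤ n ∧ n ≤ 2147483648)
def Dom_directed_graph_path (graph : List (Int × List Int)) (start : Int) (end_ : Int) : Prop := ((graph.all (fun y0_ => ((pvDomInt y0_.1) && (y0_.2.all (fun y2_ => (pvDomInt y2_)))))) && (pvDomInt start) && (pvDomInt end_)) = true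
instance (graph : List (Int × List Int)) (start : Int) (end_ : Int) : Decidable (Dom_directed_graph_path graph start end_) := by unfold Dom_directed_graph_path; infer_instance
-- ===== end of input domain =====

-- B re-implements A's recursive DFS as an iterative loop over an explicit stack of
-- (node, remaining-neighbours) frames; same return value, different decomposition
-- (no speed claim). Both ports carry a fuel counter, consumed once per node entered,
-- solely as a termination guard; the initial fuel (Σ adjacency lengths + 2) exceeds
-- any possible consumption, so the guard branch is unreachable on real runs.

-- graph.get(node, []) : first-match association-list lookup
def pvAdj (graph : List (Int × List Int)) (node : Int) : List Int :=
  (PySem.Dict.mk graph).getD node []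

-- ===== PORT A =====
-- dfsA node = A's inner 'dfs'; loopA = its 'for neighbor in graph.get(node, [])'.
-- State (visited, path) is threaded explicitly; result none = fuel guard tripped.
mutual
def dfsA (graph : List (Int × List Int)) (end_ : Int) :
    Nat → Int → PySem.Set Int → List Int → Option (Nat × Bool × PySem.Set Int × List Int)
  | f, node, v, p =>
    if node == end_ then some (f, true, v, p ++ [node])
    else if PySem.Set.contains v node then some (f, false, v, p)
    else
      match f with
      | 0 => none
      | f' + 1 =>
        match loopA graph end_ f' (pvAdj graph node) (PySem.Set.add v node) (p ++ [node]) with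
        | none => none
        | some (f2, true, v2, p2) => some (f2, true, v2, p2)
        | some (f2, false, v2, p2) => some (f2, false, v2, p2.dropLast)  -- path.pop()
termination_by f _ _ _ => (f, 0)
decreasing_by exact Prod.Lex.left _ _ (Nat.lt_succ_self _)

def loopA (graph : List (Int × List Int)) (end_ : Int) :
    Nat → List Int → PySem.Set Int → List Int → Option (Nat × Bool × PySem.Set Int × List Int)
  | f, [], v, p => some (f, false, v, p)
  | f, n :: rest, v, p =>
    match dfsA graph end_ f n v p with
    | none => none
    | some (f2, true, v2, p2) => some (f2, true, v2, p2)
    | some (f2, false, v2, p2) => loopA graph end_ (min f2 f) rest v2 p2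
termination_by f ns _ _ => (f, ns.length + 1)
decreasing_by
  · exact Prod.Lex.right _ (by simp [List.length_cons])
  · rcases Nat.lt_or_ge (min f2 f) f with h | h
    · exact Prod.Lex.left _ _ h
    · have he : min f2 f = f := Nat.le_antisymm (Nat.min_le_right _ _) h
      rw [he]; exact Prod.Lex.right _ (by simp [List.length_cons])
end

def directed_graph_path (graph : List (Int × List Int)) (start : Int) (end_ : Int) : Option (List Int) :=
  let fuel := (graph.map (fun kv => kv.2.length)).sum + 2
  match dfsA graph end_ fuel start PySem.Set.empty [] with
  | some (_, true, _, p) => some p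
  | _ => none

-- ===== PORT B =====
-- runB = B's 'while stack' loop; a frame (node, ns) is (node, remaining iterator);
-- the three arms are pop-on-exhaustion, found-end, skip-visited / push.
def runB (graph : List (Int × List Int)) (end_ : Int) :
    Nat → List (Int × List Int) → PySem.Set Int → List Int → Option (Option (List Int))
  | _, [], _, _ => some none
  | f, (_, []) :: stack, v, p => runB graph end_ f stack v p.dropLast
  | f, (node, n :: rest) :: stack, v, p =>
    if n == end_ then some (some (p ++ [n]))
    else if PySem.Set.contains v n then runB graph end_ f ((node, rest) :: stack) v p
    else
      match f with
      | 0 => none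
      | f' + 1 =>
        runB graph end_ f' ((n, pvAdj graph n) :: (node, rest) :: stack)
          (PySem.Set.add v n) (p ++ [n])
termination_by f stack _ _ => (f, (stack.map (fun fr => fr.2.length + 1)).sum)
decreasing_by
  · exact Prod.Lex.right _ (by simp [List.map_cons, List.sum_cons])
  · exact Prod.Lex.right _ (by simp [List.map_cons, List.sum_cons])
  · exact Prod.Lex.left _ _ (Nat.lt_succ_self _)

def directed_graph_path_alt (graph : List (Int × List Int)) (start : Int) (end_ : Int) : Option (List Int) :=
  if start == end_ then some [start]
  else
    let fuel := (graph.map (fun kv => kv.2.length)).sum + 2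
    match runB graph end_ (fuel - 1) [(start, pvAdj graph start)]
        (PySem.Set.add PySem.Set.empty start) [start] with
    | some r => r
    | none => none

-- ===== PRECONDITION & SPEC =====
def Spec_directed_graph_path (graph : List (Int × List Int)) (start : Int) (end_ : Int) (out : Option (List Int)) : Prop := out = directed_graph_path_alt graph start end_
instance (graph : List (Int × List Int)) (start : Int) (end_ : Int) (out : Option (List Int)) : Decidable (Spec_directed_graph_path graph start end_ out) := by unfold Spec_directed_graph_path; infer_instance

-- ===== CLAIM (what is proved, stated in full; the proofs are below) =====
def Claim_equal_directed_graph_path : Prop := ∀ (graph : List (Int × List Int)) (start : Int) (end_ : Int), Dom_directed_graph_path graph start end_ → Spec_directed_graph_path graph start end_ (directed_graph_path graph start end_)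

-- ===== LEMMAS AND PROOFS =====

-- Fuel only decreases: a some-result of dfsA/loopA carries fuel ≤ the input fuel.
theorem fuel_le (graph : List (Int × List Int)) (end_ : Int) :
    ∀ f : Nat,
      (∀ (node : Int) (v : PySem.Set Int) (p : List Int) r,
        dfsA graph end_ f node v p = some r → r.1 ≤ f) ∧
      (∀ (ns : List Int) (v : PySem.Set Int) (p : List Int) r,
        loopA graph end_ f ns v p = some r → r.1 ≤ f) := by
  intro f
  induction f using Nat.strong_induction_on with
  | _ f ih =>
    have hd : ∀ (node : Int) (v : PySem.Set Int) (p : List Int) r,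
        dfsA graph end_ f node v p = some r → r.1 ≤ f := by
      intro node v p r h
      rw [dfsA.eq_def] at h
      dsimp only at h
      split at h
      · cases h; exact le_refl _
      · split at h
        · cases h; exact le_refl _
        · cases f with
          | zero => cases h
          | succ f' =>
            dsimp only at h
            cases hl : loopA graph end_ f' (pvAdj graph node) (PySem.Set.add v node) (p ++ [node]) with
            | none => rw [hl] at h; cases h
            | some r2 =>
              obtain ⟨f2, b2, v2, p2⟩ := r2
              rw [hl] at h
              have hle : f2 ≤ f' := (ih f' (Nat.lt_succ_self _)).2 _ _ _ ⟨f2, b2, v2, p2⟩ hl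
              cases b2 <;> (cases h; exact Nat.le_succ_of_le hle)
    refine ⟨hd, ?_⟩
    intro ns
    induction ns with
    | nil => intro v p r h; rw [loopA] at h; cases h; exact le_refl _
    | cons n rest ihr =>
      intro v p r h
      rw [loopA] at h
      revert h
      cases hdres : dfsA graph end_ f n v p with
      | none => intro h; cases h
      | some r2 =>
        obtain ⟨f2, b2, v2, p2⟩ := r2
        cases b2 with
        | true => intro h; cases h; exact hd _ _ _ _ hdres
        | false =>
          intro h
          have h2 : loopA graph end_ (min f2 f) rest v2 p2 = some r := h
          rcases Nat.lt_or_ge (min f2 f) f with hlt | hge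
          · exact le_of_lt (Nat.lt_of_le_of_lt ((ih _ hlt).2 _ _ _ _ h2) hlt)
          · have heq : min f2 f = f := Nat.le_antisymm (Nat.min_le_right _ _) hge
            rw [heq] at h2
            exact ihr _ _ _ h2

-- Simulation: one stack frame of runB behaves as the corresponding loopA call,
-- and on its false exit pops the frame (dropping the entered node from the path).
theorem sim (graph : List (Int × List Int)) (end_ : Int) :
    ∀ (f : Nat) (node : Int) (ns : List Int) (stack : List (Int × List Int))
      (v : PySem.Set Int) (p : List Int),
      runB graph end_ f ((node, ns) :: stack) v p =
        match loopA graph end_ f ns v p with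
        | none => none
        | some (_, true, _, p2) => some (some p2)
        | some (f2, false, v2, p2) => runB graph end_ f2 stack v2 p2.dropLast := by
  intro f
  induction f using Nat.strong_induction_on with
  | _ f ih =>
    intro node ns stack
    induction ns with
    | nil =>
      intro v p
      rw [runB.eq_def, loopA.eq_def]
    | cons n rest ihr =>
      intro v p
      rw [runB.eq_def, loopA.eq_def]
      dsimp only
      rw [dfsA.eq_def]
      dsimp only
      by_cases hn : (n == end_) = true
      · simp only [hn, if_true]
      · simp only [hn, Bool.false_eq_true, if_false]
        by_cases hv : (PySem.Set.contains v n) = true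
        · simp only [hv, if_true]
          rw [ihr v p, Nat.min_self]
        · simp only [hv, Bool.false_eq_true, if_false]
          cases f with
          | zero => rfl
          | succ f' =>
            dsimp only
            rw [ih f' (Nat.lt_succ_self _) n (pvAdj graph n) ((node, rest) :: stack)
                (PySem.Set.add v n) (p ++ [n])]
            cases hl : loopA graph end_ f' (pvAdj graph n) (PySem.Set.add v n) (p ++ [n]) with
            | none => rfl
            | some r2 =>
              obtain ⟨f2, b2, v2, p2⟩ := r2
              have hle : f2 ≤ f' := (fuel_le graph end_ f').2 _ _ _ ⟨f2, b2, v2, p2⟩ hl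
              cases b2 with
              | true => rfl
              | false =>
                dsimp only
                have hmin : min f2 (f' + 1) = f2 :=
                  Nat.min_eq_left (Nat.le_succ_of_le hle)
                rw [hmin]
                exact ih f2 (Nat.lt_succ_of_le hle) node rest stack v2 p2.dropLast

-- Top-level wrap-up: with any successor fuel f'+1 for A (and f' for B's loop),
-- the two entry points agree.
theorem top_eq (graph : List (Int × List Int)) (start end_ : Int) (f' : Nat) :
    (match dfsA graph end_ (f' + 1) start PySem.Set.empty [] with
     | some (_, true, _, p) => some p
     | _ => none) =
    (if (start == end_) = true then some [start]
     else
       match runB graph end_ f' [(start, pvAdj graph start)]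
           (PySem.Set.add PySem.Set.empty start) [start] with
       | some r => r
       | none => none) := by
  rw [dfsA.eq_def]
  dsimp only
  by_cases hs : (start == end_) = true
  · rw [if_pos hs, if_pos hs]
    rfl
  · rw [if_neg hs, if_neg hs]
    have hc : (PySem.Set.contains PySem.Set.empty start) = false := rfl
    rw [hc]
    simp only [Bool.false_eq_true, if_false, List.nil_append]
    rw [sim graph end_ f' start (pvAdj graph start) [] (PySem.Set.add PySem.Set.empty start)
        [start]]
    cases hl : loopA graph end_ f' (pvAdj graph start)
        (PySem.Set.add PySem.Set.empty start) [start] with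
    | none => rfl
    | some r2 =>
      obtain ⟨f2, b2, v2, p2⟩ := r2
      cases b2 with
      | true => rfl
      | false =>
        dsimp only
        rw [runB.eq_def]

-- ===== VERDICT (by name: the statement is the Claim_ definition above) =====
theorem directed_graph_path_spec : Claim_equal_directed_graph_path := by
  intro graph start end_ _
  unfold Spec_directed_graph_path directed_graph_path directed_graph_path_alt
  exact top_eq graph start end_ ((graph.map (fun kv => kv.2.length)).sum + 1)
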